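-- pv_equiv track=rewrite | github.com/harigro/komdata | units/kombinasi_data.py | kombinasi_kamus
-- ===== SOURCE A (Python) =====
-- import itertools
-- from typing import Dict, List
--
-- def kombinasi_kamus(kategori: Dict[str, str]) -> Dict[str, str]:
--     """
--     Deskripsi:
--         - Membentuk kamus baru yang berisi kombinasi yang mungkin berdasarkan panjang data kamus
--     """
--     combinations = itertools.chain.from_iterable(
--         itertools.combinations(kategori.keys(), r)
--         for r in range(1, len(kategori) + 1))
--     data_kamus = {}
--     for combination in combinations:
--         combined_string = ''.join(kategori[key] for key in combination)
--         key_name = '_'.join(combination).upper()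
--         data_kamus[key_name] = combined_string
--     return data_kamus
-- ===== SOURCE B (Python) =====
-- def kombinasi_kamus(kategori):
--     """Level-wise dynamic programming over index subsets: each size-r level is
--     built from the size-(r-1) level by appending every larger index, which
--     yields size-major, lexicographic order without itertools."""
--     keys = list(kategori)
--     n = len(keys)
--     out = {}
--     level = [[]]
--     for r in range(1, n + 1):
--         level = [s + [j] for s in level for j in range(s[-1] + 1 if s else 0, n)]
--         for s in level:
--             out['_'.join(keys[j] for j in s).upper()] = ''.join(kategori[keys[j]] for j in s)
--     return out
-- ===== Notes on version B (the rewrite author's own statement) =====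
-- stated objective: alternative
-- what changed: Replaces the itertools.chain-of-itertools.combinations enumeration over key strings by a level-wise dynamic program over index subsets: each size-r level is built from the size-(r-1) level by appending every larger index, emitting the same subsets in the same size-major lexicographic order without itertools.
import Mathlib
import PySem

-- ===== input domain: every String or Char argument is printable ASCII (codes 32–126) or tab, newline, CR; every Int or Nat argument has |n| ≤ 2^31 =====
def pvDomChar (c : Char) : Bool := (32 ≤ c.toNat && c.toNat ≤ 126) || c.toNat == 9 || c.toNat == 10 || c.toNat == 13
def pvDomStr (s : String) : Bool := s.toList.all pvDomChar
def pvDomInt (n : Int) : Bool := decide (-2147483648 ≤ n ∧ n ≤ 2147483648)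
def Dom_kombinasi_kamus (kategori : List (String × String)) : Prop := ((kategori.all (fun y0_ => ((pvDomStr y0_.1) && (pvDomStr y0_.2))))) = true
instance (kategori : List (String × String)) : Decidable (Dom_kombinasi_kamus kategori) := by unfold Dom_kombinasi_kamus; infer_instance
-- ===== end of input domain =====

-- B replaces the itertools.chain/itertools.combinations enumeration by a level-wise
-- dynamic programming over index subsets (each size-r level extends the size-(r-1)
-- level by every larger index); same return value, alternative algorithm.

-- ===== PORT A =====
-- loop body of A: data_kamus['_'.join(c).upper()] = ''.join(kategori[key] for key in c)
def pvBodyA (d : PySem.Dict String String) (out : PySem.Dict String String) (c : List String) : PySem.Dict String String :=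
  out.insert (PySem.Str.upper (PySem.Str.join "_" c))
             (PySem.Str.join "" (c.map (fun k => d.getD k "")))
             -- kategori[key] with key drawn from kategori.keys(): always present, so getD is exact

def kombinasi_kamus (kategori : List (String × String)) : List (String × String) :=
  let d := PySem.Dict.ofList kategori
  let combos := (PySem.List.pyRange 1 ((d.size : Int) + 1) 1).flatMap
    (fun r => PySem.List.combinations d.keys r.toNat)
  (combos.foldl (pvBodyA d) PySem.Dict.empty).items

-- ===== PORT B =====
-- level = [s + [j] for s in level for j in range(s[-1] + 1 if s else 0, n)]
def pvLevelStep (n : Int) (level : List (List Int)) : List (List Int) :=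
  level.flatMap (fun s =>
    (PySem.List.pyRange (if s.isEmpty then 0 else PySem.List.pyGetD s (-1) 0 + 1) n 1).map
      (fun j => s ++ [j]))

-- inner loop body of B: out['_'.join(keys[j] for j in s).upper()] = ''.join(kategori[keys[j]] for j in s)
def pvBodyB (d : PySem.Dict String String) (keys : List String) (out : PySem.Dict String String) (s : List Int) : PySem.Dict String String :=
  out.insert (PySem.Str.upper (PySem.Str.join "_" (s.map (fun j => PySem.List.pyGetD keys j ""))))
             (PySem.Str.join "" (s.map (fun j => d.getD (PySem.List.pyGetD keys j "") "")))

def kombinasi_kamus_alt (kategori : List (String × String)) : List (String × String) :=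
  let d := PySem.Dict.ofList kategori
  let keys := d.keys
  let n : Int := (d.size : Int)
  let res := (PySem.List.pyRange 1 (n + 1) 1).foldl
    (fun (st : List (List Int) × PySem.Dict String String) _r =>
      let level := pvLevelStep n st.1
      (level, level.foldl (pvBodyB d keys) st.2))
    ([[]], PySem.Dict.empty)
  res.2.items

-- ===== PRECONDITION & SPEC =====
def Spec_kombinasi_kamus (kategori : List (String × String)) (out : List (String × String)) : Prop := out = kombinasi_kamus_alt kategori
instance (kategori : List (String × String)) (out : List (String × String)) : Decidable (Spec_kombinasi_kamus kategori out) := by unfold Spec_kombinasi_kamus; infer_instance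

-- ===== CLAIM (what is proved, stated in full; the proofs are below) =====
def Claim_equal_kombinasi_kamus : Prop := ∀ (kategori : List (String × String)), Dom_kombinasi_kamus kategori → Spec_kombinasi_kamus kategori (kombinasi_kamus kategori)

-- ===== LEMMAS AND PROOFS =====

lemma pv_le_getLast (l : List Int) (hp : l.Pairwise (· < ·)) (hne : l ≠ []) :
    ∀ x ∈ l, x ≤ l.getLast hne := by
  induction l with
  | nil => simp
  | cons a t ih =>
    intro x hx
    cases t with
    | nil => simp at hx; simp [hx]
    | cons b u =>
      rw [List.getLast_cons (by simp)]
      rcases List.mem_cons.mp hx with rfl | hx'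
      · have h1 := (List.pairwise_cons.mp hp).1
        exact le_of_lt (h1 _ (List.getLast_mem (by simp)))
      · exact ih (List.pairwise_cons.mp hp).2 (by simp) x hx'

lemma pv_filter_range (n : Int) (s : List Int) (hs : s.Sublist (PySem.List.pyRange 0 n 1)) :
    (PySem.List.pyRange 0 n 1).filter (fun y => s.all (fun x => decide (x < y)))
      = PySem.List.pyRange (if s.isEmpty then 0 else PySem.List.pyGetD s (-1) 0 + 1) n 1 := by
  cases s with
  | nil => simp
  | cons a t =>
    have hne : (a :: t) ≠ [] := by simp
    set m := (a :: t).getLast hne with hm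
    have hmem : m ∈ a :: t := List.getLast_mem hne
    have hmR : 0 ≤ m ∧ m < n := (PySem.List.mem_pyRange_one).mp (hs.subset hmem)
    have hsorted : (a :: t).Pairwise (· < ·) :=
      (PySem.List.pairwise_lt_pyRange_one (a := 0) (b := n)).sublist hs
    have hle : ∀ x ∈ a :: t, x ≤ m := pv_le_getLast _ hsorted hne
    have hcong : ∀ y ∈ PySem.List.pyRange 0 n 1,
        ((a :: t).all (fun x => decide (x < y)) = decide (m < y)) := by
      intro y _
      by_cases h : m < y
      · simp only [h, decide_true, List.all_eq_true, decide_eq_true_eq]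
        intro x hx; exact lt_of_le_of_lt (hle x hx) h
      · simp only [h, decide_false, List.all_eq_false]
        exact ⟨m, hmem, by simpa using h⟩
    rw [List.filter_congr hcong,
        PySem.List.pyRange_one_append 0 (m + 1) n (by omega) (by omega),
        List.filter_append]
    have h1 : (PySem.List.pyRange 0 (m + 1) 1).filter (fun y => decide (m < y)) = [] := by
      apply List.filter_eq_nil_iff.mpr
      intro y hy
      have := (PySem.List.mem_pyRange_one).mp hy
      simpa using by omega
    have h2 : (PySem.List.pyRange (m + 1) n 1).filter (fun y => decide (m < y))
        = PySem.List.pyRange (m + 1) n 1 := by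
      apply List.filter_eq_self.mpr
      intro y hy
      have := (PySem.List.mem_pyRange_one).mp hy
      simpa using by omega
    rw [h1, h2]
    simp only [List.isEmpty_cons, List.nil_append, Bool.false_eq_true, if_false]
    rw [PySem.List.pyGetD_neg_one (a :: t) 0 hne]


lemma pv_ext_combinations (l : List Int) (hl : l.Pairwise (· < ·)) : ∀ (k : Nat),
    (PySem.List.combinations l k).flatMap
        (fun s => ((l.filter (fun y => s.all (fun x => decide (x < y)))).map (fun y => s ++ [y])))
      = PySem.List.combinations l (k + 1) := by
  induction hl with
  | nil =>
    intro k
    cases k with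
    | zero => simp [PySem.List.combinations_zero, PySem.List.combinations_one]
    | succ t => simp [PySem.List.combinations_nil_succ]
  | cons hx _hp ih =>
    rename_i a l'
    intro k
    cases k with
    | zero =>
      simp only [PySem.List.combinations_zero, List.flatMap_cons, List.flatMap_nil,
        List.all_nil, List.append_nil]
      simp [PySem.List.combinations_one]
    | succ t =>
      rw [PySem.List.combinations_cons_succ, List.flatMap_append,
          PySem.List.combinations_cons_succ]
      have h₁ : ((PySem.List.combinations l' t).map (a :: ·)).flatMap
            (fun s => ((a :: l').filter (fun y => s.all (fun x => decide (x < y)))).map (fun y => s ++ [y]))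
          = (PySem.List.combinations l' (t + 1)).map (a :: ·) := by
        rw [List.flatMap_map]
        have hcong : ∀ s' ∈ PySem.List.combinations l' t,
            (((a :: l').filter (fun y => (a :: s').all (fun x => decide (x < y)))).map (fun y => (a :: s') ++ [y]))
              = ((l'.filter (fun y => s'.all (fun x => decide (x < y)))).map (fun y => s' ++ [y])).map (a :: ·) := by
          intro s' _
          rw [List.filter_cons]
          simp only [lt_irrefl, decide_false, List.all_cons, Bool.false_and, Bool.false_eq_true,
            if_false]
          have hc2 : List.filter (fun y => decide (a < y) && s'.all (fun x => decide (x < y))) l'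
              = List.filter (fun y => s'.all (fun x => decide (x < y))) l' :=
            List.filter_congr (fun y hy => by simp [hx y hy])
          rw [hc2]
          rw [List.map_map]
          rfl
        calc (PySem.List.combinations l' t).flatMap
                (fun s' => ((a :: l').filter (fun y => (a :: s').all (fun x => decide (x < y)))).map (fun y => (a :: s') ++ [y]))
            = (PySem.List.combinations l' t).flatMap
                (fun s' => ((l'.filter (fun y => s'.all (fun x => decide (x < y)))).map (fun y => s' ++ [y])).map (a :: ·)) := by
              rw [List.flatMap_def, List.flatMap_def, List.map_congr_left hcong]
          _ = ((PySem.List.combinations l' t).flatMap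
                (fun s' => (l'.filter (fun y => s'.all (fun x => decide (x < y)))).map (fun y => s' ++ [y]))).map (a :: ·) := by
              rw [List.map_flatMap]
          _ = (PySem.List.combinations l' (t + 1)).map (a :: ·) := by rw [ih t]
      have h₂ : (PySem.List.combinations l' (t + 1)).flatMap
            (fun s => ((a :: l').filter (fun y => s.all (fun x => decide (x < y)))).map (fun y => s ++ [y]))
          = PySem.List.combinations l' (t + 2) := by
        have hcong : ∀ s ∈ PySem.List.combinations l' (t + 1),
            (((a :: l').filter (fun y => s.all (fun x => decide (x < y)))).map (fun y => s ++ [y]))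
              = ((l'.filter (fun y => s.all (fun x => decide (x < y)))).map (fun y => s ++ [y])) := by
          intro s hsmem
          rcases s with _ | ⟨e, s'⟩
          · have := PySem.List.length_of_mem_combinations hsmem
            simp at this
          · rw [List.filter_cons]
            have he : e ∈ l' := (PySem.List.sublist_of_mem_combinations hsmem).subset (by simp)
            have : ¬ (e < a) := by have := hx e he; omega
            simp only [List.all_cons, this, decide_false, Bool.false_and, Bool.false_eq_true,
              if_false]
        rw [List.flatMap_def, List.map_congr_left hcong, ← List.flatMap_def, ih (t + 1)]
      rw [h₁, h₂]

lemma pv_level_step (n : Int) (k : Nat) :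
    pvLevelStep n (PySem.List.combinations (PySem.List.pyRange 0 n 1) k)
      = PySem.List.combinations (PySem.List.pyRange 0 n 1) (k + 1) := by
  rw [← pv_ext_combinations _ (PySem.List.pairwise_lt_pyRange_one 0 n) k]
  unfold pvLevelStep
  rw [List.flatMap_def, List.flatMap_def]
  apply congrArg
  apply List.map_congr_left
  intro s hsmem
  rw [pv_filter_range n s (PySem.List.sublist_of_mem_combinations hsmem)]

def pvCombosUpto (n : Int) : Nat → List (List Int)
  | 0 => []
  | m + 1 => pvCombosUpto n m ++ PySem.List.combinations (PySem.List.pyRange 0 n 1) (m + 1)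

lemma pv_B_fold (n : Int) (m : Nat)
    (bodyB : PySem.Dict String String → List Int → PySem.Dict String String) :
    (PySem.List.pyRange 1 ((m : Int) + 1) 1).foldl
        (fun (st : List (List Int) × PySem.Dict String String) _r =>
          let level := pvLevelStep n st.1
          (level, level.foldl bodyB st.2))
        ([[]], PySem.Dict.empty)
      = (PySem.List.combinations (PySem.List.pyRange 0 n 1) m,
         (pvCombosUpto n m).foldl bodyB PySem.Dict.empty) := by
  induction m with
  | zero =>
    rw [PySem.List.pyRange_one_eq_nil (by omega)]
    simp [pvCombosUpto, PySem.List.combinations_zero]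
  | succ m ih =>
    have hc : ((m + 1 : Nat) : Int) + 1 = (((m : Int) + 1) + 1) := by push_cast; ring
    rw [hc, PySem.List.pyRange_one_succ_right (by omega), List.foldl_append, ih]
    simp only [List.foldl_cons, List.foldl_nil]
    rw [pv_level_step]
    have : pvCombosUpto n (m + 1)
        = pvCombosUpto n m ++ PySem.List.combinations (PySem.List.pyRange 0 n 1) (m + 1) := rfl
    rw [this, List.foldl_append]

lemma pv_A_index (n : Int) (m : Nat) :
    (PySem.List.pyRange 1 ((m : Int) + 1) 1).flatMap
        (fun r => PySem.List.combinations (PySem.List.pyRange 0 n 1) r.toNat)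
      = pvCombosUpto n m := by
  induction m with
  | zero =>
    rw [PySem.List.pyRange_one_eq_nil (a := 1) (b := ((0 : Nat) : Int) + 1) (by omega)]; rfl
  | succ m ih =>
    have hc : ((m + 1 : Nat) : Int) + 1 = (((m : Int) + 1) + 1) := by push_cast; ring
    rw [hc, PySem.List.pyRange_one_succ_right (by omega), List.flatMap_append, ih]
    have ht : ((m : Int) + 1).toNat = m + 1 := by omega
    simp only [List.flatMap_cons, List.flatMap_nil, List.append_nil, ht]
    rfl

-- ===== VERDICT (by name: the statement is the Claim_ definition above) =====
theorem kombinasi_kamus_spec : Claim_equal_kombinasi_kamus := by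
  intro kategori _
  unfold Spec_kombinasi_kamus kombinasi_kamus kombinasi_kamus_alt
  dsimp only
  set d := PySem.Dict.ofList kategori with hd
  set g : Int → String := fun j => PySem.List.pyGetD d.keys j "" with hg
  have hsize : (d.size : Int) = (d.keys.length : Int) := by
    simp [PySem.Dict.size, PySem.Dict.keys]
  have hkeys : (PySem.List.pyRange 0 (d.keys.length : Int) 1).map g = d.keys :=
    PySem.List.map_pyGetD_pyRange_zero' d.keys ""
  have hcomb : ∀ k : Nat, PySem.List.combinations d.keys k
      = (PySem.List.combinations (PySem.List.pyRange 0 (d.keys.length : Int) 1) k).map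
          (List.map g) := by
    intro k
    conv_lhs => rw [← hkeys]
    rw [PySem.List.combinations_map]
  have hflat : (PySem.List.pyRange 1 ((d.keys.length : Int) + 1) 1).flatMap
        (fun r => PySem.List.combinations d.keys r.toNat)
      = (pvCombosUpto (d.keys.length : Int) d.keys.length).map (List.map g) := by
    calc (PySem.List.pyRange 1 ((d.keys.length : Int) + 1) 1).flatMap
            (fun r => PySem.List.combinations d.keys r.toNat)
        = (PySem.List.pyRange 1 ((d.keys.length : Int) + 1) 1).flatMap
            (fun r => (PySem.List.combinations (PySem.List.pyRange 0 (d.keys.length : Int) 1) r.toNat).map (List.map g)) := by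
          simp only [hcomb]
      _ = ((PySem.List.pyRange 1 ((d.keys.length : Int) + 1) 1).flatMap
            (fun r => PySem.List.combinations (PySem.List.pyRange 0 (d.keys.length : Int) 1) r.toNat)).map (List.map g) := by
          rw [List.map_flatMap]
      _ = (pvCombosUpto (d.keys.length : Int) d.keys.length).map (List.map g) := by
          rw [pv_A_index]
  have hbody : (fun out s => pvBodyA d out (List.map g s)) = pvBodyB d d.keys := by
    funext out s
    simp [pvBodyA, pvBodyB, hg, List.map_map, Function.comp_def]
  rw [hsize, hflat, List.foldl_map, hbody,
      pv_B_fold (d.keys.length : Int) d.keys.length (pvBodyB d d.keys)]
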